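-- pv_equiv track=rewrite | github.com/Wendy-Xiao/ext_summ_disco_tree_attn | run.py | build_final_summary
-- ===== SOURCE A (Python) =====
-- def build_final_summary(order_summ, disco_to_sent):
-- 	d = {}
-- 	for edu_idx,txt in order_summ:
-- 		sent_num = disco_to_sent[edu_idx]
-- 		if sent_num in d:
-- 			d[sent_num]= d[sent_num]+' '+txt
-- 		else:
-- 			d[sent_num] = txt
-- 	final_summ = []
-- 	for k in sorted(d.keys()):
-- 		final_summ.append(d[k])
-- 	return '\n'.join(final_summ)
-- ===== SOURCE B (Python) =====
-- def build_final_summary(order_summ, disco_to_sent):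
--     pairs = [(disco_to_sent[e], t) for e, t in order_summ]
--     sents = sorted({s for s, _ in pairs})
--     return '\n'.join(' '.join(t for s2, t in pairs if s2 == s) for s in sents)
-- ===== Notes on version B (the rewrite author's own statement) =====
-- stated objective: alternative
-- what changed: Replaces the incremental dict of growing concatenated strings with a dict-free two-phase plan: map to (sentence, txt) pairs, take the sorted distinct sentence numbers, and for each one filter-and-join its texts in one comprehension.
import Mathlib
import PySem

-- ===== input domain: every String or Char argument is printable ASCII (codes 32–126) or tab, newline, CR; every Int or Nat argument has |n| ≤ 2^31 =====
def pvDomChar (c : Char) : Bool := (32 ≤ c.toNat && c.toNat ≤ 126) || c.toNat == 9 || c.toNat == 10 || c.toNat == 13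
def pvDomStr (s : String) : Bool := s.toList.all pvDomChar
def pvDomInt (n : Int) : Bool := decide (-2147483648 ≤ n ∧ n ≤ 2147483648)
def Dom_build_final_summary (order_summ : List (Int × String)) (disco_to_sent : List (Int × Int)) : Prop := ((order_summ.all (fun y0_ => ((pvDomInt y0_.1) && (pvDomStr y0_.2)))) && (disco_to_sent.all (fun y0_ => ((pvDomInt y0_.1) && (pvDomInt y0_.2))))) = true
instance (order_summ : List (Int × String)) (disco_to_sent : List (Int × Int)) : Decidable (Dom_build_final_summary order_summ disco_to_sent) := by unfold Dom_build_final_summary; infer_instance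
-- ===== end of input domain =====

-- B replaces A's incrementally-built dict of concatenated strings by a dict-free plan:
-- sorted distinct sentence numbers, then one filter-and-join per sentence (alternative, not faster).


-- ===== PORT A =====
-- shared A/B helper: `disco_to_sent[edu_idx]` on the dict; Pre_ excludes the KeyError
-- inputs, so the default 0 is never reached on admitted inputs.
def pvLookup (dd : PySem.Dict Int Int) (e : Int) : Int := PySem.Dict.getD dd e 0

-- the body of A's first for-loop: `if sent_num in d: d[sent_num] = d[sent_num]+' '+txt else: d[sent_num] = txt`
def pvStepA (dd : PySem.Dict Int Int) (d : PySem.Dict Int String) (p : Int × String) : PySem.Dict Int String :=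
  let sent_num := pvLookup dd p.1
  match PySem.Dict.get? d sent_num with
  | some v => PySem.Dict.insert d sent_num (v ++ " " ++ p.2)
  | none   => PySem.Dict.insert d sent_num p.2

def build_final_summary (order_summ : List (Int × String)) (disco_to_sent : List (Int × Int)) : String :=
  let dd := PySem.Dict.ofList disco_to_sent
  let d := order_summ.foldl (pvStepA dd) PySem.Dict.empty
  -- `d[k]` in the output loop always hits an existing key, so the "" default is never reached
  let final_summ := (PySem.List.sorted (PySem.Dict.keys d) (fun k => k) false).foldl
      (fun acc k => acc ++ [PySem.Dict.getD d k ""]) ([] : List String)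
  PySem.Str.join "\n" final_summ

-- ===== PORT B =====
def build_final_summary_alt (order_summ : List (Int × String)) (disco_to_sent : List (Int × Int)) : String :=
  let dd := PySem.Dict.ofList disco_to_sent
  let pairs := order_summ.map (fun p => (pvLookup dd p.1, p.2))
  let sents := PySem.List.sorted (PySem.Set.ofList (pairs.map (fun q => q.1))) (fun s => s) false
  PySem.Str.join "\n" (sents.map (fun s =>
    PySem.Str.join " " ((pairs.filter (fun q => q.1 == s)).map (fun q => q.2))))

-- ===== PRECONDITION & SPEC =====
-- Pre_ excludes exactly the inputs where Python raises KeyError (both A and B index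
-- disco_to_sent[edu_idx]): every edu index of order_summ must be a key of disco_to_sent.
def Pre_build_final_summary (order_summ : List (Int × String)) (disco_to_sent : List (Int × Int)) : Prop :=
  order_summ.all (fun p => disco_to_sent.any (fun q => q.1 == p.1)) = true
instance (order_summ : List (Int × String)) (disco_to_sent : List (Int × Int)) : Decidable (Pre_build_final_summary order_summ disco_to_sent) := by unfold Pre_build_final_summary; infer_instance
def pvWitness_build_final_summary : (List (Int × String)) × (List (Int × Int)) :=
  ([(0, "deep learning"), (2, "is"), (1, "fun")], [(0, 1), (1, 0), (2, 1)])

def Spec_build_final_summary (order_summ : List (Int × String)) (disco_to_sent : List (Int × Int)) (out : String) : Prop := out = build_final_summary_alt order_summ disco_to_sent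
instance (order_summ : List (Int × String)) (disco_to_sent : List (Int × Int)) (out : String) : Decidable (Spec_build_final_summary order_summ disco_to_sent out) := by unfold Spec_build_final_summary; infer_instance

-- ===== CLAIM (what is proved, stated in full; the proofs are below) =====
def Claim_equal_build_final_summary : Prop := ∀ (order_summ : List (Int × String)) (disco_to_sent : List (Int × Int)), Dom_build_final_summary order_summ disco_to_sent → Pre_build_final_summary order_summ disco_to_sent → Spec_build_final_summary order_summ disco_to_sent (build_final_summary order_summ disco_to_sent)

-- ===== LEMMAS AND PROOFS =====

-- running value of A's dict at one key, abstracted: fold A's "concat or start" update over a list of texts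
def pvOptJoin (o : Option String) (ts : List String) : Option String :=
  ts.foldl (fun o t => some (match o with | some v => v ++ " " ++ t | none => t)) o

theorem pvStepA_eq (dd : PySem.Dict Int Int) :
    pvStepA dd = fun d p => PySem.Dict.insert d (pvLookup dd p.1)
      (match PySem.Dict.get? d (pvLookup dd p.1) with | some v => v ++ " " ++ p.2 | none => p.2) := by
  funext d p
  unfold pvStepA
  cases h : PySem.Dict.get? d (pvLookup dd p.1) <;> simp [h]

theorem pvGet?_foldA (dd : PySem.Dict Int Int) (l : List (Int × String)) (d : PySem.Dict Int String) (c : Int) :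
    PySem.Dict.get? (l.foldl (pvStepA dd) d) c =
      pvOptJoin (PySem.Dict.get? d c)
        ((((l.map (fun p => (pvLookup dd p.1, p.2))).filter (fun q => q.1 == c)).map (fun q => q.2))) := by
  induction l generalizing d with
  | nil => rfl
  | cons p l ih =>
    simp only [List.foldl_cons, List.map_cons, List.filter_cons]
    rw [ih]
    by_cases h : pvLookup dd p.1 = c
    · subst h
      have hg : PySem.Dict.get? (pvStepA dd d p) (pvLookup dd p.1)
          = some (match PySem.Dict.get? d (pvLookup dd p.1) with | some v => v ++ " " ++ p.2 | none => p.2) := by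
        rw [pvStepA_eq]
        exact PySem.Dict.get?_insert_self ..
      rw [hg]
      simp [pvOptJoin]
    · have hb : ((pvLookup dd p.1, p.2).1 == c) = false := by simpa using h
      have hg : PySem.Dict.get? (pvStepA dd d p) c = PySem.Dict.get? d c := by
        rw [pvStepA_eq]
        exact PySem.Dict.get?_insert_of_ne _ _ (fun hc => h hc.symm)
      rw [hg, hb]
      simp

theorem pvOptJoin_some (ts : List String) : ∀ v : String,
    pvOptJoin (some v) ts = some (PySem.Str.join " " (v :: ts)) := by
  induction ts with
  | nil =>
    intro v
    simp only [pvOptJoin, List.foldl_nil, PySem.Str.join]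
    simp [PySem.Chars.join_singleton]
  | cons t ts ih =>
    intro v
    have h1 : pvOptJoin (some v) (t :: ts) = pvOptJoin (some (v ++ " " ++ t)) ts := rfl
    rw [h1, ih]
    congr 1
    simp only [PySem.Str.join, List.map_cons]
    congr 1
    rw [PySem.Chars.join_cons_cons]
    cases ts with
    | nil => simp [PySem.Chars.join_singleton]
    | cons u us => simp [PySem.Chars.join_cons_cons]

theorem pvOptJoin_none (t : String) (ts : List String) :
    pvOptJoin none (t :: ts) = some (PySem.Str.join " " (t :: ts)) := by
  have h : pvOptJoin none (t :: ts) = pvOptJoin (some t) ts := rfl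
  rw [h, pvOptJoin_some]

-- ===== VERDICT (by name: the statement is the Claim_ definition above) =====
theorem build_final_summary_spec : Claim_equal_build_final_summary := by
  intro order_summ disco_to_sent _hdom _hpre
  set dd := PySem.Dict.ofList disco_to_sent with hdd
  set pairs := order_summ.map (fun p => (pvLookup dd p.1, p.2)) with hpairs
  set d := order_summ.foldl (pvStepA dd) (PySem.Dict.empty : PySem.Dict Int String) with hd
  show PySem.Str.join "\n"
      ((PySem.List.sorted (PySem.Dict.keys d) (fun k => k) false).foldl
        (fun acc k => acc ++ [PySem.Dict.getD d k ""]) ([] : List String))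
    = PySem.Str.join "\n"
      ((PySem.List.sorted (PySem.Set.ofList (pairs.map (fun q => q.1))) (fun s => s) false).map
        (fun s => PySem.Str.join " " ((pairs.filter (fun q => q.1 == s)).map (fun q => q.2))))
  -- the dict's keys are exactly the distinct sentence numbers, in first-occurrence order
  have hkeys : PySem.Dict.keys d = PySem.Set.ofList (pairs.map (fun q => q.1)) := by
    rw [hd, pvStepA_eq]
    rw [PySem.Dict.keys_foldl_insert_key order_summ (fun p => pvLookup dd p.1) _ PySem.Dict.empty]
    simp [hpairs, List.map_map, Function.comp_def, PySem.Set.update, PySem.Set.ofList]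
  rw [hkeys]
  set ks := PySem.List.sorted (PySem.Set.ofList (pairs.map (fun q => q.1))) (fun s => s) false with hks
  rw [PySem.List.foldl_append_singleton_eq_map (fun k => PySem.Dict.getD d k "") ks []]
  simp only [List.nil_append]
  congr 1
  apply List.map_congr_left
  intro k hk
  have hkmem : k ∈ pairs.map (fun q => q.1) := by
    rw [hks, PySem.List.mem_sorted] at hk
    exact (PySem.Set.mem_ofList _ _).1 hk
  -- k occurs among the sentence numbers, so its filtered text list is nonempty
  have hne : ((pairs.filter (fun q => q.1 == k)).map (fun q => q.2)) ≠ [] := by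
    obtain ⟨q, hq, hqk⟩ := List.mem_map.1 hkmem
    have hmem : q ∈ pairs.filter (fun q => q.1 == k) := by
      simp [List.mem_filter, hq, hqk]
    intro hnil
    rw [List.map_eq_nil_iff] at hnil
    rw [hnil] at hmem
    exact (List.not_mem_nil) hmem
  have hget : PySem.Dict.get? d k =
      pvOptJoin none ((pairs.filter (fun q => q.1 == k)).map (fun q => q.2)) := by
    rw [hd, pvGet?_foldA, hpairs]
    rfl
  cases hts : (pairs.filter (fun q => q.1 == k)).map (fun q => q.2) with
  | nil => exact absurd hts hne
  | cons t ts =>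
    rw [hts] at hget
    rw [pvOptJoin_none] at hget
    show (PySem.Dict.get? d k).getD "" = _
    rw [hget]
    rfl
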